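-- pv_equiv track=rewrite | github.com/vinr515/Timeline | Webpage.py | add_time_spans
-- ===== SOURCE A (Python) =====
-- def add_time_spans(barVals, lastTime):
--     """Adds the time spans as a string for each bar/value that gets displayed"""
--     newVals = []
--     for i in range(len(barVals)-1):
--         fromDate, toDate = check_bc_time(barVals[i][2]), check_bc_time(barVals[i+1][2])
--         newName = "{} ({} - {})".format(barVals[i][0], fromDate, toDate)
--         ###The width is a percentage of the screen that is used for the webpage
--         width = str(barVals[i][1])+"%"
--         newVals.append([newName, width])
--
--     fromDate, toDate = check_bc_time(barVals[-1][2]), check_bc_time(lastTime)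
--     newName = "{} ({} - {})".format(barVals[-1][0], fromDate, toDate)
--     newVals.append([newName, str(barVals[-1][1])+"%"])
--     return newVals
--
-- def check_bc_time(timeString):
--     """Returns a new string that uses B.C is the year is negative"""
--     newTime = timeString.split('/')
--     if(len(newTime) < 3 or "b.c" in newTime[2].lower() or int(newTime[2]) >= 0):
--         return timeString
--     string = '/'.join(newTime[:2] + [str(abs(int(newTime[2]))) + " B.C"])
--     return string
-- ===== SOURCE B (Python) =====
-- def check_bc_time(timeString):
--     """Returns a new string that uses B.C is the year is negative"""
--     newTime = timeString.split('/')
--     if(len(newTime) < 3 or "b.c" in newTime[2].lower() or int(newTime[2]) >= 0):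
--         return timeString
--     string = '/'.join(newTime[:2] + [str(abs(int(newTime[2]))) + " B.C"])
--     return string
--
-- def add_time_spans(barVals, lastTime):
--     """Right-to-left pass: walk the bars backwards carrying the end date in an
--     accumulator (initially lastTime), prepending each finished row."""
--     newVals = []
--     toDate = lastTime
--     for bar in reversed(barVals):
--         row = ["{} ({} - {})".format(bar[0], check_bc_time(bar[2]), check_bc_time(toDate)),
--                str(bar[1]) + "%"]
--         newVals = [row] + newVals
--         toDate = bar[2]
--     return newVals
-- ===== Notes on version B (the rewrite author's own statement) =====
-- stated objective: alternative
-- what changed: A indexes forward over range(len-1) with a duplicated trailing special case; B instead walks the bars right-to-left with an accumulator that carries the current end date (seeded with lastTime), prepending each row, so no indexing, no lookahead and no special case exist.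
import Mathlib
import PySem

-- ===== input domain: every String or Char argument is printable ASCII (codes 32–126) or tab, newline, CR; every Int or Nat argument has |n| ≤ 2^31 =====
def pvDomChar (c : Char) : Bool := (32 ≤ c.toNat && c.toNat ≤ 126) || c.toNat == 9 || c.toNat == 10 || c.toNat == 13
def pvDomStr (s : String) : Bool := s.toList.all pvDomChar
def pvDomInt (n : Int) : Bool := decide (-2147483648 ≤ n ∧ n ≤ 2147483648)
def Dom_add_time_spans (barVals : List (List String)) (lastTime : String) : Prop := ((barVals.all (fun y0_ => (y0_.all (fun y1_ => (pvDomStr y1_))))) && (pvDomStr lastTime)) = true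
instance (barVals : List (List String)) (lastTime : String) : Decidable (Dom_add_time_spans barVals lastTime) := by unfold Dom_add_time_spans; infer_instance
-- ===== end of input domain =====

-- B replaces A's forward index loop plus duplicated trailing special case by one backwards
-- pass carrying the end date in an accumulator; equal on Pre_ (exactly the inputs where A
-- returns; on empty barVals A raises IndexError while B returns []).

-- ===== PORT A =====
-- shared module helper check_bc_time (used verbatim by both Pythons)
def check_bc_time (timeString : String) : String :=
  let newTime := (PySem.Str.split? timeString "/").getD []  -- sep "/" ≠ "": split? is always `some`
  if newTime.length < 3 then timeString
  else if PySem.Str.isIn "b.c" (PySem.Str.lower (newTime.getD 2 "")) then timeString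
  else
    match PySem.Int.ofStr? (newTime.getD 2 "") with
    | none => timeString   -- Python raises ValueError here; such inputs are outside Pre_
    | some y =>
      if 0 ≤ y then timeString
      else PySem.Str.join "/" (newTime.take 2 ++ [PySem.Int.toStr ((y.natAbs : Nat) : Int) ++ " B.C"])

-- "{} ({} - {})".format(name, fromDate, toDate) (same format call in A and B)
def fmtSpan (name fromDate toDate : String) : String :=
  name ++ " (" ++ fromDate ++ " - " ++ toDate ++ ")"

def add_time_spans (barVals : List (List String)) (lastTime : String) : List (List String) :=
  -- indices in the loop are in range under Pre_, so pyGetD's defaults are never used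
  let newVals := (PySem.List.pyRange 0 ((barVals.length : Int) - 1) 1).foldl
    (fun acc i =>
      let fromDate := check_bc_time (PySem.List.pyGetD (PySem.List.pyGetD barVals i []) 2 "")
      let toDate := check_bc_time (PySem.List.pyGetD (PySem.List.pyGetD barVals (i + 1) []) 2 "")
      let newName := fmtSpan (PySem.List.pyGetD (PySem.List.pyGetD barVals i []) 0 "") fromDate toDate
      let width := PySem.List.pyGetD (PySem.List.pyGetD barVals i []) 1 "" ++ "%"
      acc ++ [[newName, width]]) ([] : List (List String))
  let lastBar := PySem.List.pyGetD barVals (-1) []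
  let fromDate := check_bc_time (PySem.List.pyGetD lastBar 2 "")
  let toDate := check_bc_time lastTime
  let newName := fmtSpan (PySem.List.pyGetD lastBar 0 "") fromDate toDate
  newVals ++ [[newName, PySem.List.pyGetD lastBar 1 "" ++ "%"]]

-- ===== PORT B =====
-- one row of the output: [formatted name with span, width]
def rowOf (bar : List String) (toDate : String) : List String :=
  [fmtSpan (PySem.List.pyGetD bar 0 "")
           (check_bc_time (PySem.List.pyGetD bar 2 ""))
           (check_bc_time toDate),
   PySem.List.pyGetD bar 1 "" ++ "%"]

def add_time_spans_alt (barVals : List (List String)) (lastTime : String) : List (List String) :=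
  -- 'for bar in reversed(barVals)' with state (newVals, toDate); '[row] + newVals' is cons
  (barVals.reverse.foldl
    (fun (st : List (List String) × String) bar =>
      (rowOf bar st.2 :: st.1, PySem.List.pyGetD bar 2 ""))
    (([] : List (List String)), lastTime)).1

-- ===== PRECONDITION & SPEC =====
-- check_bc_time(s) returns normally iff s has < 3 '/'-fields, or its third field names "b.c", or parses as int
def okBCTime (s : String) : Prop :=
  let parts := (PySem.Str.split? s "/").getD []
  parts.length < 3 ∨ PySem.Str.isIn "b.c" (PySem.Str.lower (parts.getD 2 "")) = true
    ∨ (PySem.Int.ofStr? (parts.getD 2 "")).isSome = true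

-- Pre_ = exactly the inputs where Python A returns (nonempty bars, each bar with ≥ 3 fields,
-- every examined time string accepted by check_bc_time)
def Pre_add_time_spans (barVals : List (List String)) (lastTime : String) : Prop :=
  barVals ≠ [] ∧ (∀ bar ∈ barVals, 3 ≤ bar.length ∧ okBCTime (bar.getD 2 "")) ∧ okBCTime lastTime
instance (barVals : List (List String)) (lastTime : String) : Decidable (Pre_add_time_spans barVals lastTime) := by
  unfold Pre_add_time_spans okBCTime; infer_instance

def pvWitness_add_time_spans : List (List String) × String := ([["A", "10", "5"]], "7")

def Spec_add_time_spans (barVals : List (List String)) (lastTime : String) (out : List (List String)) : Prop := out = add_time_spans_alt barVals lastTime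
instance (barVals : List (List String)) (lastTime : String) (out : List (List String)) : Decidable (Spec_add_time_spans barVals lastTime out) := by unfold Spec_add_time_spans; infer_instance

-- ===== CLAIM (what is proved, stated in full; the proofs are below) =====
def Claim_equal_add_time_spans : Prop := ∀ (barVals : List (List String)) (lastTime : String), Dom_add_time_spans barVals lastTime → Pre_add_time_spans barVals lastTime → Spec_add_time_spans barVals lastTime (add_time_spans barVals lastTime)

-- ===== LEMMAS AND PROOFS =====

-- proof-side uniform characterisation both ports are reduced to: each bar zipped with its end date
def zipForm (barVals : List (List String)) (lastTime : String) : List (List String) :=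
  (barVals.zip ((barVals.drop 1).map (fun b => PySem.List.pyGetD b 2 "") ++ [lastTime])).map
    (fun p => rowOf p.1 p.2)

-- B's backwards fold computes zipForm, and its carried date is the head bar's date
theorem alt_foldr_pair (l : List (List String)) (lastTime : String) :
    l.foldr (fun bar st => (rowOf bar st.2 :: st.1, PySem.List.pyGetD bar 2 ""))
        (([] : List (List String)), lastTime)
      = (zipForm l lastTime,
         match l with | [] => lastTime | b :: _ => PySem.List.pyGetD b 2 "") := by
  induction l with
  | nil => simp [zipForm]
  | cons b rest ih =>
    cases rest with
    | nil => simp [zipForm]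
    | cons c r => simp [zipForm, ih]

theorem alt_eq_zipForm (barVals : List (List String)) (lastTime : String) :
    add_time_spans_alt barVals lastTime = zipForm barVals lastTime := by
  unfold add_time_spans_alt
  rw [List.foldl_reverse, alt_foldr_pair]

-- barVals[-1] is the last element
theorem pyGetD_neg_one {α : Type} (xs : List α) (d : α) (h : xs ≠ []) :
    PySem.List.pyGetD xs (-1) d = xs.getD (xs.length - 1) d := by
  have hl : 0 < xs.length := List.length_pos_of_ne_nil h
  simp only [PySem.List.pyGetD, PySem.List.pyGet?, PySem.List.pyIdx?, List.getD_eq_getElem?_getD]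
  rw [if_neg (by omega), if_pos (by omega)]
  norm_num

-- A's forward loop + trailing append computes zipForm too
theorem a_eq_zipForm (barVals : List (List String)) (lastTime : String)
    (h : barVals ≠ []) :
    add_time_spans barVals lastTime = zipForm barVals lastTime := by
  have hl : 0 < barVals.length := List.length_pos_of_ne_nil h
  simp only [add_time_spans, zipForm]
  rw [PySem.List.foldl_append_singleton_eq_map, PySem.List.pyRange_one, List.map_map]
  rw [pyGetD_neg_one _ _ h]
  simp only [List.nil_append]
  apply List.ext_getElem
  · simp only [List.length_append, List.length_map, List.length_range, List.length_zip,
      List.length_drop, List.length_cons, List.length_nil]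
    omega
  · intro i hi1 hi2
    simp only [List.length_append, List.length_map, List.length_range, List.length_zip,
      List.length_drop, List.length_cons, List.length_nil] at hi1 hi2
    rw [List.getElem_map, List.getElem_zip]
    by_cases hc : i < barVals.length - 1
    · rw [List.getElem_append_left (by simp only [List.length_map, List.length_range]; omega),
          List.getElem_map, List.getElem_range,
          List.getElem_append_left (by simp only [List.length_map, List.length_drop]; omega),
          List.getElem_map, List.getElem_drop]
      simp only [Function.comp, zero_add, rowOf]
      rw [PySem.List.pyGetD_natCast]
      have : ((i:Int) + 1) = ((i+1 : Nat) : Int) := by push_cast; ring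
      rw [this, PySem.List.pyGetD_natCast]
      simp [List.getD_eq_getElem?_getD, (by omega : i < barVals.length),
        (by omega : i + 1 < barVals.length), Nat.add_comm]
    · have hi : i = barVals.length - 1 := by omega
      rw [List.getElem_append_right (by simp only [List.length_map, List.length_range]; omega),
          List.getElem_append_right (by simp only [List.length_map, List.length_drop]; omega)]
      simp only [List.length_map, List.length_range, List.length_drop]
      rw [List.getElem_singleton, List.getElem_singleton]
      simp [List.getD_eq_getElem?_getD, hi, rowOf,
        (by omega : barVals.length - 1 < barVals.length)]

-- ===== VERDICT (by name: the statement is the Claim_ definition above) =====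
theorem add_time_spans_spec : Claim_equal_add_time_spans := by
  intro barVals lastTime _ hpre
  unfold Spec_add_time_spans
  rw [a_eq_zipForm barVals lastTime hpre.1, alt_eq_zipForm]
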